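-- pv_equiv track=rewrite | github.com/ihorivliev/Tests | EE3.py | is_strongly_connected
-- ===== SOURCE A (Python) =====
-- nodes = [0, 1, 2]
--
-- def is_strongly_connected(adj):
--     """Return True if graph is strongly connected."""
--     def reachable(u, v):
--         stack = [u]
--         seen = {u}
--         while stack:
--             x = stack.pop()
--             for w in nodes:
--                 if adj[x][w] and w not in seen:
--                     seen.add(w)
--                     stack.append(w)
--         return v in seen
--     for u in nodes:
--         for v in nodes:
--             if not reachable(u, v):
--                 return False
--     return True
-- ===== SOURCE B (Python) =====
-- nodes = [0, 1, 2]
--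
-- def is_strongly_connected(adj):
--     """Return True if graph is strongly connected (Floyd-Warshall transitive closure)."""
--     reach = {(i, j): i == j or adj[i][j] != 0 for i in nodes for j in nodes}
--     for k in nodes:
--         for i in nodes:
--             for j in nodes:
--                 if reach[i, k] and reach[k, j]:
--                     reach[i, j] = True
--     return all(reach.values())
-- ===== Notes on version B (the rewrite author's own statement) =====
-- stated objective: alternative
-- what changed: Replaces the per-pair DFS (9 stack-based searches) with one Floyd-Warshall transitive-closure table built in a single triple loop over the 3 nodes.
-- outside the precondition, e.g. on is_strongly_connected([[0, 0, 0]]): A returns False, B raises IndexError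
import Mathlib
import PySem

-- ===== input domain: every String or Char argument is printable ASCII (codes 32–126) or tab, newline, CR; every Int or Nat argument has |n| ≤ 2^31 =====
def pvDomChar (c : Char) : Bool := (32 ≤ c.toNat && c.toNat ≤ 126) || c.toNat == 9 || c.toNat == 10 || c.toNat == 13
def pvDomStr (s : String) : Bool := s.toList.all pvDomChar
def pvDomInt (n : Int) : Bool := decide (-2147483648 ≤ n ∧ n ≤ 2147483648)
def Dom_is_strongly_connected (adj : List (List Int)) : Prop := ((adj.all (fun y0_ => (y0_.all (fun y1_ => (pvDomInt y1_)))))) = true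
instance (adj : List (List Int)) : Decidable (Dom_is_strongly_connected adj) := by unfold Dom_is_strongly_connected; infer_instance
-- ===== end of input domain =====

-- B replaces A's nine per-pair DFS searches by one Floyd–Warshall transitive-closure table
-- (objective: alternative decomposition, similar cost on the fixed 3-node graph).

-- ===== PORT A =====
-- module-level `nodes = [0, 1, 2]`
def pvNodes : List Int := [0, 1, 2]

-- `adj[x][w]` as a truth value; pyGetD's defaults are only reached outside Pre_ (where Python raises)
def pvEdge (adj : List (List Int)) (x w : Int) : Bool :=
  decide (PySem.List.pyGetD (PySem.List.pyGetD adj x []) w 0 ≠ 0)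

-- body of `for w in nodes: if adj[x][w] and w not in seen: seen.add(w); stack.append(w)`
def pvPush (g : Int → Int → Bool) (x : Int) (p : List Int × PySem.Set Int) (w : Int) :
    List Int × PySem.Set Int :=
  if g x w && !(p.2.contains w) then (p.1 ++ [w], p.2.add w) else p

-- the `while stack:` loop; fuel 8 is a totality guard only: the loop pops at most
-- 1 + 3 times (each push adds a new element of `nodes` to `seen`)
def pvDfsLoop (g : Int → Int → Bool) : Nat → List Int → PySem.Set Int → PySem.Set Int
  | 0, _, seen => seen
  | _ + 1, [], seen => seen
  | f + 1, s :: stack, seen =>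
      let x := (s :: stack).getLast (by simp)          -- x = stack.pop()
      let p := pvNodes.foldl (pvPush g x) ((s :: stack).dropLast, seen)
      pvDfsLoop g f p.1 p.2

def pvReachable (g : Int → Int → Bool) (u v : Int) : Bool :=
  (pvDfsLoop g 8 [u] (PySem.Set.ofList [u])).contains v

-- the double loop with early `return False` (List.all short-circuits identically)
def pvAllPairs (g : Int → Int → Bool) : Bool :=
  pvNodes.all (fun u => pvNodes.all (fun v => pvReachable g u v))

def is_strongly_connected (adj : List (List Int)) : Bool :=
  pvAllPairs (pvEdge adj)

-- ===== PORT B =====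
-- `reach = {(i, j): i == j or adj[i][j] != 0 for i in nodes for j in nodes}`
def pvCloseInit (g : Int → Int → Bool) : PySem.Dict (Int × Int) Bool :=
  pvNodes.foldl
    (fun d i => pvNodes.foldl (fun d j => d.insert (i, j) (decide (i = j) || g i j)) d)
    PySem.Dict.empty

-- the k/i/j triple loop; every key is present, so `reach[i, k]` = getD with any default
def pvClose (g : Int → Int → Bool) : PySem.Dict (Int × Int) Bool :=
  pvNodes.foldl
    (fun d k => pvNodes.foldl
      (fun d i => pvNodes.foldl
        (fun d j =>
          if d.getD (i, k) false && d.getD (k, j) false then d.insert (i, j) true else d)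
        d)
      d)
    (pvCloseInit g)

def is_strongly_connected_alt (adj : List (List Int)) : Bool :=
  (PySem.Dict.values (pvClose (pvEdge adj))).all (fun b => b)

-- ===== PRECONDITION & SPEC =====
-- Pre_ excludes adjacency lists smaller than 3×3: there Python A's short-circuiting DFS can
-- still return (e.g. it returns False on [[0,0,0]]) while B's closure reads every adj[i][j]
-- and raises IndexError, and on other such inputs A itself raises.
def Pre_is_strongly_connected (adj : List (List Int)) : Prop :=
  3 ≤ adj.length ∧ ∀ r ∈ adj.take 3, 3 ≤ r.length
instance (adj : List (List Int)) : Decidable (Pre_is_strongly_connected adj) := by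
  unfold Pre_is_strongly_connected; infer_instance

def pvWitness_is_strongly_connected : List (List Int) :=
  [[0, 1, 0], [0, 0, 1], [1, 0, 0]]

def Spec_is_strongly_connected (adj : List (List Int)) (out : Bool) : Prop :=
  out = is_strongly_connected_alt adj
instance (adj : List (List Int)) (out : Bool) : Decidable (Spec_is_strongly_connected adj out) := by
  unfold Spec_is_strongly_connected; infer_instance

-- ===== CLAIM (what is proved, stated in full; the proofs are below) =====
def Claim_equal_is_strongly_connected : Prop :=
  ∀ (adj : List (List Int)), Dom_is_strongly_connected adj →
    Pre_is_strongly_connected adj →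
      Spec_is_strongly_connected adj (is_strongly_connected adj)

-- ===== LEMMAS AND PROOFS =====

-- a 3×3 truth table as an edge function
def pvTab (a0 a1 a2 b0 b1 b2 c0 c1 c2 : Bool) : Int → Int → Bool := fun x w =>
  if x = 0 then (if w = 0 then a0 else if w = 1 then a1 else a2)
  else if x = 1 then (if w = 0 then b0 else if w = 1 then b1 else b2)
  else (if w = 0 then c0 else if w = 1 then c1 else c2)

theorem pvPush_foldl_mem {g : Int → Int → Bool} {x : Int} :
    ∀ (ws : List Int) (p : List Int × PySem.Set Int),
      (∀ y ∈ p.1, y ∈ pvNodes) → (∀ w ∈ ws, w ∈ pvNodes) →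
      ∀ y ∈ (ws.foldl (pvPush g x) p).1, y ∈ pvNodes := by
  intro ws
  induction ws with
  | nil => intro p hp _ y hy; exact hp y hy
  | cons w ws ih =>
      intro p hp hws
      apply ih
      · unfold pvPush
        split
        · intro y hy
          rcases List.mem_append.1 hy with h | h
          · exact hp y h
          · simpa [List.mem_singleton.1 h] using hws w (by simp)
        · exact hp
      · intro w' hw'; exact hws w' (by simp [hw'])

theorem pvPush_foldl_congr {g g' : Int → Int → Bool} {x : Int}
    (hx : x ∈ pvNodes) (h : ∀ a ∈ pvNodes, ∀ b ∈ pvNodes, g a b = g' a b) :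
    ∀ (ws : List Int) (p : List Int × PySem.Set Int),
      (∀ w ∈ ws, w ∈ pvNodes) →
      ws.foldl (pvPush g x) p = ws.foldl (pvPush g' x) p := by
  intro ws
  induction ws with
  | nil => intro p _; rfl
  | cons w ws ih =>
      intro p hws
      have hw : w ∈ pvNodes := hws w (by simp)
      have hstep : pvPush g x p w = pvPush g' x p w := by
        unfold pvPush; rw [h x hx w hw]
      simp only [List.foldl_cons, hstep]
      exact ih _ (fun w' hw' => hws w' (by simp [hw']))

theorem pvDfsLoop_congr {g g' : Int → Int → Bool}
    (h : ∀ a ∈ pvNodes, ∀ b ∈ pvNodes, g a b = g' a b) :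
    ∀ (fuel : Nat) (stack : List Int) (seen : PySem.Set Int),
      (∀ y ∈ stack, y ∈ pvNodes) →
      pvDfsLoop g fuel stack seen = pvDfsLoop g' fuel stack seen := by
  intro fuel
  induction fuel with
  | zero => intro stack seen _; rfl
  | succ f ih =>
      intro stack seen hs
      match stack with
      | [] => rfl
      | s :: stack =>
          have hx : (s :: stack).getLast (by simp) ∈ pvNodes :=
            hs _ (List.getLast_mem _)
          have hdrop : ∀ y ∈ (s :: stack).dropLast, y ∈ pvNodes := fun y hy =>
            hs y ((List.dropLast_sublist _).subset hy)
          have hall : ∀ w ∈ pvNodes, w ∈ pvNodes := fun w hw => hw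
          simp only [pvDfsLoop]
          rw [pvPush_foldl_congr hx h pvNodes ((s :: stack).dropLast, seen) hall]
          exact ih _ _ (pvPush_foldl_mem pvNodes _ hdrop hall)

theorem pvReachable_congr {g g' : Int → Int → Bool} (u : Int)
    (h : ∀ a ∈ pvNodes, ∀ b ∈ pvNodes, g a b = g' a b) (hu : u ∈ pvNodes) :
    ∀ v, pvReachable g u v = pvReachable g' u v := by
  intro v
  unfold pvReachable
  rw [pvDfsLoop_congr h 8 [u] _ (by intro y hy; rw [List.mem_singleton.1 hy]; exact hu)]

theorem pvAllPairs_congr {g g' : Int → Int → Bool}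
    (h : ∀ a ∈ pvNodes, ∀ b ∈ pvNodes, g a b = g' a b) :
    pvAllPairs g = pvAllPairs g' := by
  simp only [pvAllPairs, pvNodes, List.all_cons, List.all_nil]
  simp only [pvReachable_congr (u := 0) h (by decide), pvReachable_congr (u := 1) h (by decide),
    pvReachable_congr (u := 2) h (by decide)]

theorem pvClose_congr {g g' : Int → Int → Bool}
    (h : ∀ a ∈ pvNodes, ∀ b ∈ pvNodes, g a b = g' a b) :
    pvClose g = pvClose g' := by
  have hinit : pvCloseInit g = pvCloseInit g' := by
    simp only [pvCloseInit, pvNodes, List.foldl_cons, List.foldl_nil]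
    rw [h 0 (by decide) 0 (by decide), h 0 (by decide) 1 (by decide),
      h 0 (by decide) 2 (by decide), h 1 (by decide) 0 (by decide),
      h 1 (by decide) 1 (by decide), h 1 (by decide) 2 (by decide),
      h 2 (by decide) 0 (by decide), h 2 (by decide) 1 (by decide),
      h 2 (by decide) 2 (by decide)]
  unfold pvClose
  rw [hinit]

set_option maxRecDepth 40000 in
set_option maxHeartbeats 4000000 in
theorem pvTab_key : ∀ (a0 a1 a2 b0 b1 b2 c0 c1 c2 : Bool),
    pvAllPairs (pvTab a0 a1 a2 b0 b1 b2 c0 c1 c2) =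
      (PySem.Dict.values (pvClose (pvTab a0 a1 a2 b0 b1 b2 c0 c1 c2))).all (fun b => b) := by
  decide

theorem pvEdge_tab (adj : List (List Int)) :
    ∀ a ∈ pvNodes, ∀ b ∈ pvNodes,
      pvEdge adj a b =
        pvTab (pvEdge adj 0 0) (pvEdge adj 0 1) (pvEdge adj 0 2)
          (pvEdge adj 1 0) (pvEdge adj 1 1) (pvEdge adj 1 2)
          (pvEdge adj 2 0) (pvEdge adj 2 1) (pvEdge adj 2 2) a b := by
  intro a ha b hb
  fin_cases ha <;> fin_cases hb <;> rfl

-- ===== VERDICT (by name: the statement is the Claim_ definition above) =====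
theorem is_strongly_connected_spec : Claim_equal_is_strongly_connected := by
  intro adj _ _
  unfold Spec_is_strongly_connected is_strongly_connected is_strongly_connected_alt
  rw [pvAllPairs_congr (pvEdge_tab adj), pvClose_congr (pvEdge_tab adj)]
  exact pvTab_key _ _ _ _ _ _ _ _ _
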